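-- pv_equiv track=rewrite | github.com/DaniEruDai/timetable_bot | schedule/fucntions.py | after_restoration
-- ===== SOURCE A (Python) =====
-- def after_restoration(old, design):
--     old, design = list(old), list(design)
--     for index, ellement in enumerate(design):
--         if len(ellement) == 0:
--             design[index] = '  '
--         elif len(ellement) == 1:
--             if ellement == '&':
--                 design[index] = f'{ellement}'
--             else:
--                 design[index] = f'{ellement} '
--
--     for row in old:
--         if len(row) == len(design):
--             for index, ellement in enumerate(row):
--                 temp_list = [s for s in design[index] if '&'.lower() in s.lower()]
--                 if temp_list:
--                     left, right = design[index].split('&')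
--                     row[index] = f'{left}{ellement}{right}'
--                 else:
--                     row[index] = f'{design[index][0]}{ellement}{design[index][1]}'
--         old[old.index(row)] = row
--     return old
-- ===== SOURCE B (Python) =====
-- # B: precompute one (left, right) formatter pair per design column (partition, which never
-- # raises), then a single zip pass per matching row.  Same in-place row mutation as A.
-- def after_restoration(old, design):
--     old = list(old)
--     fmt = []
--     for cell in design:
--         if len(cell) == 0:
--             cell = '  '
--         elif len(cell) == 1 and cell != '&':
--             cell = cell + ' '
--         if '&' in cell:
--             left, _, right = cell.partition('&')
--         else:
--             left, right = cell[0], cell[1]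
--         fmt.append((left, right))
--     for row in old:
--         if len(row) == len(fmt):
--             row[:] = [l + e + r for e, (l, r) in zip(row, fmt)]
--     return old
-- ===== Notes on version B (the rewrite author's own statement) =====
-- stated objective: alternative
-- what changed: B precomputes one (left, right) formatter pair per design column (using partition, which never raises) and then formats each length-matching row in a single zip pass, instead of A's per-row re-filtering and re-splitting of every design cell and the redundant old.index write.
import Mathlib
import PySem

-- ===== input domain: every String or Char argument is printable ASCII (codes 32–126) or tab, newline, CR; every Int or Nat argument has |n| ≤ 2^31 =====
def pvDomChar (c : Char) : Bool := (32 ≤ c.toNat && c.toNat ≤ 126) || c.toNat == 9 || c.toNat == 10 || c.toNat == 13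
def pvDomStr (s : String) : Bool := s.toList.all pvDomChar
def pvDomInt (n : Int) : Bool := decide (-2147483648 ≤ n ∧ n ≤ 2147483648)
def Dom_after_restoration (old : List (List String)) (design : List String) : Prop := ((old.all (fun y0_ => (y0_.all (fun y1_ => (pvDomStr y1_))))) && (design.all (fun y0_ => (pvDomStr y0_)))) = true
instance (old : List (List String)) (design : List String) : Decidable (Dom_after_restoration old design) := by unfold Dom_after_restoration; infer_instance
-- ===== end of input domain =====

-- B replaces A's per-row re-splitting of each design cell by a per-column (left, right)
-- formatter table computed once, then one zip pass per matching row (objective: alternative /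
-- simpler decomposition).  Both A and B mutate the row lists in place; the theorems are about
-- the returned value.

-- ===== PORT A =====
-- first loop of A: normalise one design cell (assignment depends only on the element)
def pvNormA (e : String) : String :=
  if e.toList.length = 0 then "  "
  else if e.toList.length = 1 then
    (if e.toList = ['&'] then e else String.ofList (e.toList ++ [' ']))
  else e

-- inner loop body of A: temp_list test, then split('&') unpacked into two pieces
-- (any other number of pieces is Python's ValueError — excluded by Pre_, the '_' arm is a dummy)
def pvCellA (d : String) (e : String) : String :=
  if (d.toList.filter
        (fun s => PySem.Chars.isIn (PySem.Chars.lower ['&']) (PySem.Chars.lower [s]))) ≠ [] then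
    match PySem.Chars.splitOn d.toList ['&'] with
    | [l, r] => String.ofList (l ++ e.toList ++ r)
    | _ => ""
  else
    -- design[index][0] / design[index][1]: in range (every normalised cell here has ≥ 2 chars)
    String.ofList ([d.toList.getD 0 ' '] ++ e.toList ++ [d.toList.getD 1 ' '])

def after_restoration (old : List (List String)) (design : List String) : List (List String) :=
  let d := design.map pvNormA
  -- A's trailing `old[old.index(row)] = row` is a no-op: the row object already sits there
  old.map (fun row =>
    if row.length = d.length then
      -- design[index]: index < len(design), so getD is Python's indexing
      row.mapIdx (fun i e => pvCellA (d.getD i "") e)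
    else row)

-- ===== PORT B =====
-- one formatter pair per design cell; partition('&') ported by hand as takeWhile/dropWhile
-- (exact here: the branch is only taken when '&' occurs, so partition's middle is '&')
def pvFmtB (cell : String) : List Char × List Char :=
  let cs0 := cell.toList
  let cs := if cs0.length = 0 then [' ', ' ']
            else if cs0.length = 1 ∧ cs0 ≠ ['&'] then cs0 ++ [' ']
            else cs0
  if PySem.Chars.isIn ['&'] cs then
    (cs.takeWhile (fun c => c ≠ '&'), (cs.dropWhile (fun c => c ≠ '&')).tail)
  else
    -- (cell[0], cell[1]) as one-char pieces; in range: cs has ≥ 2 chars in this branch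
    (cs.take 1, (cs.drop 1).take 1)

def after_restoration_alt (old : List (List String)) (design : List String) : List (List String) :=
  let fmt := design.map pvFmtB
  old.map (fun row =>
    if row.length = fmt.length then
      (row.zip fmt).map (fun p => String.ofList (p.2.1 ++ p.1.toList ++ p.2.2))
    else row)

-- ===== PRECONDITION & SPEC =====
-- Pre_ excludes exactly the inputs where A raises ValueError: some design cell contains
-- two or more '&' AND some row's length matches, so split('&') unpacks into ≠ 2 pieces.
def Pre_after_restoration (old : List (List String)) (design : List String) : Prop :=
  (∃ row ∈ old, row.length = design.length) →
    ∀ cell ∈ design, cell.toList.count '&' ≤ 1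
instance (old : List (List String)) (design : List String) : Decidable (Pre_after_restoration old design) := by
  unfold Pre_after_restoration; infer_instance

def pvWitness_after_restoration : List (List String) × List String :=
  ([["Mo", "1"], ["x"]], ["[&]", "("])

-- A raises ValueError (too many values to unpack from split('&')) exactly when a design cell
-- has ≥ 2 '&' and some row's length matches; B's partition never raises and formats on the
-- first '&'.
def Spec_after_restoration (old : List (List String)) (design : List String) (out : List (List String)) : Prop := out = after_restoration_alt old design
instance (old : List (List String)) (design : List String) (out : List (List String)) : Decidable (Spec_after_restoration old design out) := by unfold Spec_after_restoration; infer_instance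

-- ===== CLAIM (what is proved, stated in full; the proofs are below) =====
def Claim_equal_after_restoration : Prop := ∀ (old : List (List String)) (design : List String), Dom_after_restoration old design → Pre_after_restoration old design → Spec_after_restoration old design (after_restoration old design)

-- ===== LEMMAS AND PROOFS =====

-- proof-only model of s.split('&'): structural recursion over the characters
def pvSplitAmp : List Char → List (List Char)
  | [] => [[]]
  | c :: rest =>
      if c = '&' then [] :: pvSplitAmp rest
      else (c :: (pvSplitAmp rest).headI) :: (pvSplitAmp rest).tail

lemma pvSplitAmp_ne_nil (cs : List Char) : pvSplitAmp cs ≠ [] := by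
  cases cs with
  | nil => simp [pvSplitAmp]
  | cons c rest => simp [pvSplitAmp]; split_ifs <;> simp

lemma pvSplitAmp_go (fuel : Nat) : ∀ (l cur : List Char) (accs : List (List Char)),
    l.length ≤ fuel →
    PySem.Chars.splitOn.go ['&'] fuel l cur accs =
      accs.reverse ++ (cur.reverse ++ (pvSplitAmp l).headI) :: (pvSplitAmp l).tail := by
  induction fuel with
  | zero =>
      intro l cur accs h
      have : l = [] := by cases l <;> simp_all
      subst this
      simp [PySem.Chars.splitOn.go, pvSplitAmp]
  | succ fuel ih =>
      intro l cur accs h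
      cases l with
      | nil => simp [PySem.Chars.splitOn.go, pvSplitAmp]
      | cons c rest =>
          simp only [PySem.Chars.splitOn.go]
          by_cases hc : c = '&'
          · subst hc
            rw [if_pos (by simp)]
            rw [show List.drop (['&'] : List Char).length ('&' :: rest) = rest from rfl]
            rw [ih rest [] (cur.reverse :: accs) (by simpa using Nat.le_of_succ_le_succ (by simpa using h))]
            rcases hsp : pvSplitAmp rest with _ | ⟨p, ps⟩
            · exact absurd hsp (pvSplitAmp_ne_nil rest)
            · simp [pvSplitAmp, hsp]
          · rw [if_neg (by simp [List.isPrefixOf]; intro h'; exact hc h'.symm)]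
            rw [ih rest (c :: cur) accs (by simpa using Nat.le_of_succ_le_succ (by simpa using h))]
            rcases hsp : pvSplitAmp rest with _ | ⟨p, ps⟩
            · exact absurd hsp (pvSplitAmp_ne_nil rest)
            · simp [pvSplitAmp, hc, hsp]

lemma splitOn_amp (cs : List Char) :
    PySem.Chars.splitOn cs ['&'] = pvSplitAmp cs := by
  rw [PySem.Chars.splitOn, pvSplitAmp_go (cs.length + 1) cs [] [] (by omega)]
  rcases hsp : pvSplitAmp cs with _ | ⟨p, ps⟩
  · exact absurd hsp (pvSplitAmp_ne_nil cs)
  · simp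

lemma pvSplitAmp_no_amp {cs : List Char} (h : '&' ∉ cs) : pvSplitAmp cs = [cs] := by
  induction cs with
  | nil => rfl
  | cons c rest ih =>
      simp only [List.mem_cons, not_or] at h
      simp [pvSplitAmp, Ne.symm h.1, ih h.2]

lemma pvSplitAmp_one {a b : List Char} (ha : '&' ∉ a) (hb : '&' ∉ b) :
    pvSplitAmp (a ++ '&' :: b) = [a, b] := by
  induction a with
  | nil => simp [pvSplitAmp, pvSplitAmp_no_amp hb]
  | cons c rest ih =>
      simp only [List.mem_cons, not_or] at ha
      simp [pvSplitAmp, Ne.symm ha.1, ih ha.2]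

lemma pvIsIn_amp (cs : List Char) :
    PySem.Chars.isIn ['&'] cs = true ↔ '&' ∈ cs := by
  rw [PySem.Chars.isIn_iff_infix]
  exact List.singleton_infix_iff '&' cs

lemma pvLower_amp (c : Char) : PySem.Chars.lowerChar c = '&' ↔ c = '&' := by
  constructor
  · intro h
    by_cases hu : PySem.Chars.isupper c = true
    · exfalso
      simp only [PySem.Chars.lowerChar, hu, if_pos] at h
      have hb : 65 ≤ c.toNat ∧ c.toNat ≤ 90 := by
        simp only [PySem.Chars.isupper, Bool.and_eq_true, decide_eq_true_eq, Char.le_def,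
          UInt32.le_iff_toNat_le] at hu
        exact hu
      have hv : (c.toNat + 32).isValidChar := Or.inl (by omega)
      have h' : (Char.ofNat (c.toNat + 32)).toNat = c.toNat + 32 := by
        rw [Char.toNat_ofNat, if_pos hv]
      rw [h] at h'
      rw [show ('&').toNat = 38 from rfl] at h'
      omega
    · simpa [PySem.Chars.lowerChar, hu] using h
  · rintro rfl; decide

-- the character test in A's temp_list comprehension is exactly "is '&'"
lemma pvPred_amp (c : Char) :
    (PySem.Chars.isIn (PySem.Chars.lower ['&']) (PySem.Chars.lower [c]) = true) ↔ c = '&' := by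
  rw [show PySem.Chars.lower ['&'] = ['&'] from rfl,
      show PySem.Chars.lower [c] = [PySem.Chars.lowerChar c] from rfl,
      pvIsIn_amp]
  simp only [List.mem_singleton]
  rw [eq_comm]
  exact pvLower_amp c

-- decomposition of a list containing exactly one '&'
lemma pvAmp_decomp {cs : List Char} (hmem : '&' ∈ cs) (hcount : cs.count '&' ≤ 1) :
    cs = cs.takeWhile (fun c => c ≠ '&') ++ '&' :: (cs.dropWhile (fun c => c ≠ '&')).tail ∧
      '&' ∉ cs.takeWhile (fun c => c ≠ '&') ∧
      '&' ∉ (cs.dropWhile (fun c => c ≠ '&')).tail := by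
  have hnn : cs.dropWhile (fun c => c ≠ '&') ≠ [] := by
    intro hnil
    rw [List.dropWhile_eq_nil_iff] at hnil
    simpa using hnil '&' hmem
  rcases hd : cs.dropWhile (fun c => c ≠ '&') with _ | ⟨d, t⟩
  · exact absurd hd hnn
  · have hdp := @List.head_dropWhile_not _ (fun c => decide (c ≠ '&')) cs (by rw [hd]; simp)
    have hd' : d = '&' := by
      have hh : (List.dropWhile (fun c => decide (c ≠ '&')) cs).head (by rw [hd]; simp) = d := by
        simp only [hd, List.head_cons]
      rw [hh] at hdp
      simpa using hdp
    subst hd'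
    have hsplit : cs = cs.takeWhile (fun c => c ≠ '&') ++ '&' :: t := by
      conv_lhs => rw [← List.takeWhile_append_dropWhile (p := fun c => decide (c ≠ '&')) (l := cs)]
      rw [hd]
    have hta : '&' ∉ cs.takeWhile (fun c => c ≠ '&') := by
      intro hx
      have := List.mem_takeWhile_imp hx
      simp at this
    refine ⟨by simpa [hd] using hsplit, hta, ?_⟩
    have hcnt := congrArg (List.count '&') hsplit
    simp only [List.count_append, List.count_cons_self] at hcnt
    rw [hcnt] at hcount
    have : t.count '&' = 0 := by omega
    simpa [hd, List.count_eq_zero] using this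

-- per-cell agreement, given A does not raise on this cell
lemma pvCell_eq (cell e : String) (hcount : cell.toList.count '&' ≤ 1) :
    pvCellA (pvNormA cell) e = String.ofList ((pvFmtB cell).1 ++ e.toList ++ (pvFmtB cell).2) := by
  rcases hl : cell.toList with _ | ⟨c, _ | ⟨c2, rest⟩⟩
  · -- empty cell: both sides format with two blanks
    simp [pvCellA, pvNormA, pvFmtB, hl,
      (by decide : PySem.Chars.isIn (PySem.Chars.lower ['&']) (PySem.Chars.lower [' ']) = false),
      (by decide : PySem.Chars.isIn ['&'] [' ',' '] = false)]
  · -- one-character cell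
    by_cases hc : c = '&'
    · subst hc
      simp [pvCellA, pvNormA, pvFmtB, hl, splitOn_amp, pvSplitAmp,
        (by decide : PySem.Chars.isIn (PySem.Chars.lower ['&']) (PySem.Chars.lower ['&']) = true),
        (by decide : PySem.Chars.isIn ['&'] ['&'] = true)]
    · have hpc : ¬ (PySem.Chars.isIn (PySem.Chars.lower ['&']) (PySem.Chars.lower [c]) = true) := by
        rw [pvPred_amp]; exact hc
      have hni : ¬ (PySem.Chars.isIn ['&'] [c, ' '] = true) := by
        rw [pvIsIn_amp]; simp [Ne.symm hc]
      simp [pvCellA, pvNormA, pvFmtB, hl, hc, hpc, hni,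
        (by decide : PySem.Chars.isIn (PySem.Chars.lower ['&']) (PySem.Chars.lower [' ']) = false)]
  · -- cell of length ≥ 2: kept as-is by the normalisation
    have hnorm : pvNormA cell = cell := by simp [pvNormA, hl]
    have hfmt : pvFmtB cell = (if PySem.Chars.isIn ['&'] (c :: c2 :: rest) then
        ((c :: c2 :: rest).takeWhile (fun x => x ≠ '&'), ((c :: c2 :: rest).dropWhile (fun x => x ≠ '&')).tail)
      else ((c :: c2 :: rest).take 1, ((c :: c2 :: rest).drop 1).take 1)) := by
      simp [pvFmtB, hl]
    by_cases hmem : '&' ∈ (c :: c2 :: rest)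
    · obtain ⟨hsplit, hta, htb⟩ := pvAmp_decomp hmem (by rw [← hl]; exact hcount)
      have hfil : ((c :: c2 :: rest).filter
          (fun s => PySem.Chars.isIn (PySem.Chars.lower ['&']) (PySem.Chars.lower [s]))) ≠ [] := by
        intro hnil
        rw [List.filter_eq_nil_iff] at hnil
        exact hnil '&' hmem ((pvPred_amp '&').mpr rfl)
      have hsp : PySem.Chars.splitOn (c :: c2 :: rest) ['&'] =
          [(c :: c2 :: rest).takeWhile (fun x => x ≠ '&'), ((c :: c2 :: rest).dropWhile (fun x => x ≠ '&')).tail] := by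
        rw [splitOn_amp]
        conv_lhs => rw [hsplit]
        exact pvSplitAmp_one hta htb
      rw [hnorm, hfmt, if_pos ((pvIsIn_amp _).mpr hmem)]
      simp [pvCellA, hl, hfil, hsp]
    · have hfil : ((c :: c2 :: rest).filter
          (fun s => PySem.Chars.isIn (PySem.Chars.lower ['&']) (PySem.Chars.lower [s]))) = [] := by
        rw [List.filter_eq_nil_iff]
        intro a ha hpa
        exact hmem (((pvPred_amp a).mp hpa) ▸ ha)
      rw [hnorm, hfmt, if_neg (by rw [pvIsIn_amp]; exact hmem)]
      simp [pvCellA, hl, hfil]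

-- ===== VERDICT (by name: the statement is the Claim_ definition above) =====
theorem after_restoration_spec : Claim_equal_after_restoration := by
  intro old design _ hpre
  unfold Spec_after_restoration after_restoration after_restoration_alt
  apply List.map_congr_left
  intro row hrow
  by_cases hlen : row.length = design.length
  · rw [if_pos (by simpa using hlen), if_pos (by simpa using hlen)]
    have hcells : ∀ cell ∈ design, cell.toList.count '&' ≤ 1 := hpre ⟨row, hrow, hlen⟩
    apply List.ext_getElem
    · simp [hlen]
    · intro i h1 h2
      have hi : i < design.length := (by simpa using h2 : i < row.length ∧ i < design.length).2
      rw [List.getElem_mapIdx, List.getElem_map, List.getElem_zip]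
      have hd : (design.map pvNormA).getD i "" = pvNormA design[i] := by
        rw [List.getD_eq_getElem _ _ (by simpa using hi), List.getElem_map]
      rw [hd]
      simpa using pvCell_eq design[i] row[i] (hcells _ (design.getElem_mem hi))
  · rw [if_neg (by simpa using hlen), if_neg (by simpa using hlen)]
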